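-- pv_equiv track=rewrite | github.com/Mycology-Microbiology-Center/EUKARYOME | formats/v1_8/uchime.py | transform_header
-- ===== SOURCE A (Python) =====
-- def transform_header(header):
--     # Split the header on semicolons and remove the last element, typically "unused"
--     parts = header.split(';')
--     # Initialize transformed_parts with the ID part, which doesn't change
--     transformed_parts = [parts[0]]
--     # Define the prefixes for taxonomic ranks
--     taxonomic_ranks = ['k__', 'p__', 'c__', 'o__', 'f__', 'g__', 's__']
--     # Process each part of the header, replacing '.' with 'unclassified', starting from the second element
--     for rank, part in zip(taxonomic_ranks, parts[1:]):
--         if part == '.' or part == 'unused':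
--             transformed_parts.append(rank + 'unclassified')
--         else:
--             transformed_parts.append(rank + part)
--     # If there are fewer parts than ranks, fill the remaining ranks with 'unclassified'
--     for i in range(len(parts) - 1, len(taxonomic_ranks)):
--         transformed_parts.append(taxonomic_ranks[i] + 'unclassified')
--
--     return ';'.join(transformed_parts)
-- ===== SOURCE B (Python) =====
-- def _ranks(ranks, fields):
--     # Recursively emit one ';rank<name>' segment per remaining rank,
--     # consuming one field per step ('.' stands in when fields run out).
--     if not ranks:
--         return ''
--     v = fields[0] if fields else '.'
--     name = 'unclassified' if v in ('.', 'unused') else v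
--     return ';' + ranks[0] + name + _ranks(ranks[1:], fields[1:])
--
--
-- def transform_header(header):
--     parts = header.split(';')
--     return parts[0] + _ranks(['k__', 'p__', 'c__', 'o__', 'f__', 'g__', 's__'], parts[1:])
-- ===== Notes on version B (the rewrite author's own statement) =====
-- stated objective: simpler
-- what changed: Replaces A's imperative list-building (zip loop, then a range fill loop, then ';'.join) by a single recursion over the seven rank prefixes that consumes one field per step (a '.' sentinel once fields run out) and concatenates the result string directly, with no intermediate list or join.
import Mathlib
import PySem

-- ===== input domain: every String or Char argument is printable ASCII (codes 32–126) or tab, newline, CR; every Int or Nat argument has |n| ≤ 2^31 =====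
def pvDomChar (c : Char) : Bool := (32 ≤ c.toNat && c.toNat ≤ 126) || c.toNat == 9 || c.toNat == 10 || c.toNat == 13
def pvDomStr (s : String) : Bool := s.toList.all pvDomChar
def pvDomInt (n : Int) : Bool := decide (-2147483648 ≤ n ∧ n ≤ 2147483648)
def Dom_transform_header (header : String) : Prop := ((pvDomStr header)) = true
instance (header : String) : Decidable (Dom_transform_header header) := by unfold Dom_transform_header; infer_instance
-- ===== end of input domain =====

-- B replaces A's imperative list-building (zip loop + range fill loop + join) by a recursion
-- over the seven rank prefixes that concatenates the output string directly (objective: simpler).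

-- ===== PORT A =====
def thRanksA : List String := ["k__", "p__", "c__", "o__", "f__", "g__", "s__"]

-- literal port of A; the [] branch is unreachable (str.split never returns an empty list)
def transform_header (header : String) : String :=
  match PySem.Str.split? header ";" with
  | none => ""        -- unreachable: the separator ";" is nonempty
  | some [] => ""
  | some (p0 :: rest) =>
    -- first loop: for rank, part in zip(taxonomic_ranks, parts[1:])
    let tp1 := (thRanksA.zip rest).foldl (fun acc (rp : String × String) =>
        if rp.2 == "." || rp.2 == "unused" then acc ++ [rp.1 ++ "unclassified"]
        else acc ++ [rp.1 ++ rp.2]) [p0]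
    -- second loop: for i in range(len(parts) - 1, len(taxonomic_ranks))
    let tp2 := (PySem.List.pyRange ((rest.length : Int) + 1 - 1) 7 1).foldl (fun acc i =>
        acc ++ [PySem.List.pyGetD thRanksA i "" ++ "unclassified"]) tp1
    PySem.Str.join ";" tp2

-- ===== PORT B =====
-- port of Source B's _ranks: recursion on the rank list, consuming one field per step
def thRanksGo : List String → List String → String
  | [], _ => ""
  | r :: rs, fields =>
    let v := match fields with | [] => "." | f :: _ => f
    let name := if v == "." || v == "unused" then "unclassified" else v
    ";" ++ r ++ name ++ thRanksGo rs fields.tail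

def transform_header_alt (header : String) : String :=
  match PySem.Str.split? header ";" with
  | none => ""        -- unreachable: the separator ";" is nonempty
  | some [] => ""
  | some (p0 :: rest) =>
    p0 ++ thRanksGo ["k__", "p__", "c__", "o__", "f__", "g__", "s__"] rest

-- ===== PRECONDITION & SPEC =====
def Spec_transform_header (header : String) (out : String) : Prop := out = transform_header_alt header
instance (header : String) (out : String) : Decidable (Spec_transform_header header out) := by unfold Spec_transform_header; infer_instance

-- ===== CLAIM (what is proved, stated in full; the proofs are below) =====
def Claim_equal_transform_header : Prop := ∀ (header : String), Dom_transform_header header → Spec_transform_header header (transform_header header)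

-- ===== LEMMAS AND PROOFS =====
set_option maxHeartbeats 1000000

-- proof-only helpers: the segment-concatenation view of ';'.join(p0 :: l)
def thSeg : List String → String
  | [] => ""
  | s :: t => ";" ++ s ++ thSeg t

theorem join_cons_eq_seg (p0 : String) (l : List String) :
    PySem.Str.join ";" (p0 :: l) = p0 ++ thSeg l := by
  induction l generalizing p0 with
  | nil =>
    apply String.toList_injective
    simp [PySem.Str.join, PySem.Chars.join, thSeg, List.intercalate]
  | cons s t ih =>
    apply String.toList_injective
    have := congrArg String.toList (ih s)
    simp [PySem.Str.join, PySem.Chars.join, String.toList_append, thSeg,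
      List.intercalate] at this ⊢
    simp [this]

theorem foldl_snoc {α β : Type} (f : α → β) :
    ∀ (l : List α) (init : List β),
      l.foldl (fun acc x => acc ++ [f x]) init = init ++ l.map f := by
  intro l
  induction l with
  | nil => intro init; simp
  | cons x t ih => intro init; simp [List.foldl, ih]

-- A's loop body with the if pulled inside the appended element
theorem gsplit (r v : String) :
    (if v == "." || v == "unused" then r ++ "unclassified" else r ++ v)
      = r ++ (if v == "." || v == "unused" then "unclassified" else v) := by
  split <;> rfl

theorem seg_eq_go (rest : List String) :
    thSeg ((thRanksA.zip rest).map (fun rp =>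
        if rp.2 == "." || rp.2 == "unused" then rp.1 ++ "unclassified" else rp.1 ++ rp.2)
      ++ (PySem.List.pyRange (rest.length : Int) 7 1).map
          (fun i => PySem.List.pyGetD thRanksA i "" ++ "unclassified"))
      = thRanksGo ["k__", "p__", "c__", "o__", "f__", "g__", "s__"] rest := by
  rcases rest with _|⟨a, _|⟨b, _|⟨c, _|⟨d, _|⟨e, _|⟨f, _|⟨g, t⟩⟩⟩⟩⟩⟩⟩
  case cons.cons.cons.cons.cons.cons.cons =>
    -- eight or more fields: the fill range is empty and zip truncates at 7
    rw [PySem.List.pyRange_one_eq_nil (by simp only [List.length_cons]; push_cast; omega)]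
    simp only [thRanksA, List.zip, List.zipWith, List.map, List.append_nil,
      thSeg, thRanksGo, List.tail, gsplit, String.append_assoc]
  all_goals
    simp only [thRanksA, List.zip, List.zipWith, List.map, List.length,
      thRanksGo, List.tail, gsplit]
    norm_num [PySem.List.pyRange_one_cons, PySem.List.pyRange_one_eq_nil]
    apply String.toList_injective
    norm_num [PySem.List.pyGetD, PySem.List.pyIdx?, PySem.List.pyGet?, thSeg, thRanksA,
      List.range_succ, Function.comp, List.map_append, String.toList_append,
      Int.toNat, List.getElem_cons_zero, List.getElem_cons_succ,
      apply_ite String.toList]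

theorem transform_header_eq_alt (header : String) :
    transform_header header = transform_header_alt header := by
  unfold transform_header transform_header_alt
  cases h : PySem.Str.split? header ";" with
  | none => rfl
  | some parts =>
    cases parts with
    | nil => rfl
    | cons p0 rest =>
      dsimp only
      have hf : (fun (acc : List String) (rp : String × String) =>
          if rp.2 == "." || rp.2 == "unused" then acc ++ [rp.1 ++ "unclassified"]
          else acc ++ [rp.1 ++ rp.2])
          = (fun acc rp => acc ++ [if rp.2 == "." || rp.2 == "unused"
              then rp.1 ++ "unclassified" else rp.1 ++ rp.2]) := by
        funext acc rp; split <;> rfl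
      rw [hf, foldl_snoc, foldl_snoc]
      have hn : ((rest.length : Int) + 1 - 1) = (rest.length : Int) := by omega
      rw [hn]
      have hsplit : ([p0] ++ (thRanksA.zip rest).map (fun rp =>
            if rp.2 == "." || rp.2 == "unused" then rp.1 ++ "unclassified" else rp.1 ++ rp.2))
          ++ (PySem.List.pyRange (rest.length : Int) 7 1).map
              (fun i => PySem.List.pyGetD thRanksA i "" ++ "unclassified")
          = p0 :: ((thRanksA.zip rest).map (fun rp =>
            if rp.2 == "." || rp.2 == "unused" then rp.1 ++ "unclassified" else rp.1 ++ rp.2)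
          ++ (PySem.List.pyRange (rest.length : Int) 7 1).map
              (fun i => PySem.List.pyGetD thRanksA i "" ++ "unclassified")) := by simp
      rw [hsplit, join_cons_eq_seg, seg_eq_go]

-- ===== VERDICT (by name: the statement is the Claim_ definition above) =====
theorem transform_header_spec : Claim_equal_transform_header :=
  fun header _ => transform_header_eq_alt header
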